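-- pv_equiv track=rewrite | github.com/moeffju/rp23-scraper | scrape.py | group_data_by_day
-- ===== SOURCE A (Python) =====
-- def group_data_by_day(data):
--     day_groups = []
--     current_day = None
--     for session in data:
--         session_day = session["start_date"]
--         if session_day != current_day:
--             current_day = session_day
--             day_groups.append([])
--         day_groups[-1].append(session)
--     return day_groups
-- ===== SOURCE B (Python) =====
-- def group_data_by_day(data):
--     n = len(data)
--     bounds = [i for i in range(n) if i == 0 or data[i]["start_date"] != data[i - 1]["start_date"]]
--     return [data[a:b] for a, b in zip(bounds, bounds[1:] + [n])]
-- ===== Notes on version B (the rewrite author's own statement) =====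
-- stated objective: alternative
-- what changed: Replaces the single-pass accumulator (current_day tracking plus appends to day_groups[-1]) with two staged passes: first compute the list of run-boundary indices by comparing each element's start_date with its predecessor, then cut the input into groups by slicing between consecutive boundaries.
import Mathlib
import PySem

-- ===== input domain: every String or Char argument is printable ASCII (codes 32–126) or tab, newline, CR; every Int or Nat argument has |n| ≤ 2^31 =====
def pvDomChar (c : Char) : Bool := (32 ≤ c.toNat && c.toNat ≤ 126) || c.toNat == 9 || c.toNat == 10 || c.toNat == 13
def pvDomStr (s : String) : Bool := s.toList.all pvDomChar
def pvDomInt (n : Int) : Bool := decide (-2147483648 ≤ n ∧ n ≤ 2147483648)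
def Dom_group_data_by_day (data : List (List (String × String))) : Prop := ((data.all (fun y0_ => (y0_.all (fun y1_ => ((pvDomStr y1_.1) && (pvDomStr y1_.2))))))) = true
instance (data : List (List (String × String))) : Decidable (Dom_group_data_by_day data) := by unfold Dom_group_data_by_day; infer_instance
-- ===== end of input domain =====

-- B replaces A's single-pass accumulator with two staged passes: compute run-boundary
-- indices, then slice the input between consecutive boundaries (alternative, same cost).

-- session["start_date"]: dict lookup, first match in the association list (none = KeyError)
def pvKey (s : List (String × String)) : Option String := List.lookup "start_date" s

-- ===== PORT A =====
-- day_groups[-1].append(session): append to the last group.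
-- On an empty group list Python would raise IndexError; that point is unreachable
-- under Pre_ (the first iteration always appends a group), so [] is returned there.
def pvAppendLast (groups : List (List (List (String × String)))) (s : List (String × String)) :
    List (List (List (String × String))) :=
  match groups with
  | [] => []
  | [g] => [g ++ [s]]
  | g :: gs => g :: pvAppendLast gs s

-- loop state: (day_groups, current_day); current_day = none plays Python's None,
-- some k a string; pvKey session = none (KeyError, excluded by Pre_) is carried as-is.
def pvStep (st : List (List (List (String × String))) × Option String)
    (session : List (String × String)) :
    List (List (List (String × String))) × Option String :=
  let session_day := pvKey session
  let st' := if session_day ≠ st.2 then (st.1 ++ [[]], session_day) else st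
  (pvAppendLast st'.1 session, st'.2)

def group_data_by_day (data : List (List (String × String))) : List (List (List (String × String))) :=
  (data.foldl pvStep ([], none)).1

-- ===== PORT B =====
-- data[i]["start_date"] for an index i of range(n) (in range; missing key = none, excluded by Pre_)
def pvKeyAt (data : List (List (String × String))) (i : Int) : Option String :=
  (PySem.List.pyGet? data i).bind pvKey

-- bounds = [i for i in range(n) if i == 0 or data[i]["start_date"] != data[i-1]["start_date"]]
def pvBounds (data : List (List (String × String))) : List Int :=
  (PySem.List.pyRange 0 (PySem.List.len data) 1).filter
    (fun i => i == 0 || !(pvKeyAt data i == pvKeyAt data (i - 1)))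

-- [data[a:b] for a, b in zip(bounds, bounds[1:] + [n])]
def group_data_by_day_alt (data : List (List (String × String))) : List (List (List (String × String))) :=
  ((pvBounds data).zip ((pvBounds data).drop 1 ++ [PySem.List.len data])).map
    (fun p => PySem.List.slice data (some p.1) (some p.2))

-- ===== PRECONDITION & SPEC =====
-- Pre_ excludes exactly the sessions without a "start_date" key, on which A raises KeyError.
def Pre_group_data_by_day (data : List (List (String × String))) : Prop :=
  ∀ s ∈ data, (pvKey s).isSome = true
instance (data : List (List (String × String))) : Decidable (Pre_group_data_by_day data) := by
  unfold Pre_group_data_by_day; infer_instance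

def pvWitness_group_data_by_day : (List (List (String × String))) :=
  [[("start_date", "2023-07-05"), ("title", "a")], [("start_date", "2023-07-06")]]

def Spec_group_data_by_day (data : List (List (String × String))) (out : List (List (List (String × String)))) : Prop := out = group_data_by_day_alt data
instance (data : List (List (String × String))) (out : List (List (List (String × String)))) : Decidable (Spec_group_data_by_day data out) := by unfold Spec_group_data_by_day; infer_instance

-- ===== CLAIM (what is proved, stated in full; the proofs are below) =====
def Claim_equal_group_data_by_day : Prop := ∀ (data : List (List (String × String))), Dom_group_data_by_day data → Pre_group_data_by_day data → Spec_group_data_by_day data (group_data_by_day data)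

-- ===== LEMMAS AND PROOFS =====

-- common description of both programs' result: the list of maximal runs of equal start_date
def pvGroupRuns : List (List (String × String)) → List (List (List (String × String)))
  | [] => []
  | s :: rest =>
      (s :: rest.takeWhile (fun t => pvKey t == pvKey s)) ::
        pvGroupRuns (rest.dropWhile (fun t => pvKey t == pvKey s))
termination_by l => l.length
decreasing_by
  simp only [List.length_cons]
  have := List.length_dropWhile_le (p := fun t => pvKey t == pvKey s) (l := rest)
  omega

-- ---- A = runs (loop invariant for A's fold) ----

theorem pvStep_new (gs : List (List (List (String × String)))) (c : Option String)
    (s : List (String × String)) (h : pvKey s ≠ c) :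
    pvStep (gs, c) s = (pvAppendLast (gs ++ [[]]) s, pvKey s) := by
  simp [pvStep, h]

theorem pvStep_same (gs : List (List (List (String × String)))) (c : Option String)
    (s : List (String × String)) (h : pvKey s = c) :
    pvStep (gs, c) s = (pvAppendLast gs s, c) := by
  simp [pvStep, h]

theorem pvAppendLast_snoc (gs : List (List (List (String × String))))
    (g : List (List (String × String))) (s : List (String × String)) :
    pvAppendLast (gs ++ [g]) s = gs ++ [g ++ [s]] := by
  induction gs with
  | nil => rfl
  | cons h t ih =>
    cases t with
    | nil => simp [pvAppendLast]
    | cons h' t' => simp_all [pvAppendLast]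

-- invariant of A's fold: having a last group g opened for key k, the loop fills g with the
-- run of key k and then behaves like pvGroupRuns on the remainder
theorem pvFold_run (data : List (List (String × String)))
    (hpre : ∀ s ∈ data, (pvKey s).isSome = true) :
    ∀ (gs : List (List (List (String × String)))) (g : List (List (String × String))) (k : String),
    (data.foldl pvStep (gs ++ [g], some k)).1 =
    gs ++ (g ++ data.takeWhile (fun t => pvKey t == some k)) ::
      pvGroupRuns (data.dropWhile (fun t => pvKey t == some k)) := by
  induction data with
  | nil => intro gs g k; simp [pvGroupRuns]
  | cons s rest ih =>
    intro gs g k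
    obtain ⟨k', hk'⟩ := Option.isSome_iff_exists.mp (hpre s (by simp))
    have hrest : ∀ t ∈ rest, (pvKey t).isSome = true := fun t ht => hpre t (by simp [ht])
    rw [List.foldl_cons, List.takeWhile_cons, List.dropWhile_cons]
    by_cases hkk : k' = k
    · subst hkk
      rw [pvStep_same _ _ _ hk', pvAppendLast_snoc, ih hrest gs (g ++ [s]) k']
      simp [hk']
    · have hne : pvKey s ≠ some k := by simp [hk', hkk]
      rw [pvStep_new _ _ _ hne, hk',
        show gs ++ [g] ++ [[]] = (gs ++ [g]) ++ [([] : List (List (String × String)))] by simp,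
        pvAppendLast_snoc]
      simp only [List.nil_append]
      rw [ih hrest (gs ++ [g]) [s] k']
      have hbeq : ((some k' : Option String) == some k) = false := by simp [hkk]
      rw [hbeq]
      simp only [Bool.false_eq_true, if_false, List.nil_append, List.append_assoc,
        List.cons_append, List.nil_append]
      rw [pvGroupRuns]
      simp [hk']

theorem pvA_eq_runs (data : List (List (String × String)))
    (hpre : ∀ s ∈ data, (pvKey s).isSome = true) :
    group_data_by_day data = pvGroupRuns data := by
  unfold group_data_by_day
  cases data with
  | nil => simp [pvGroupRuns]
  | cons s rest =>
    obtain ⟨k, hk⟩ := Option.isSome_iff_exists.mp (hpre s (by simp))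
    have hrest : ∀ t ∈ rest, (pvKey t).isSome = true := fun t ht => hpre t (by simp [ht])
    have hne : pvKey s ≠ none := by simp [hk]
    rw [List.foldl_cons, pvStep_new _ _ _ hne, hk,
      show ([] : List (List (List (String × String)))) ++ [[]] = [] ++ [[]] by rfl,
      pvAppendLast_snoc]
    simp only [List.nil_append]
    rw [show ([[s]] : List (List (List (String × String)))) = [] ++ [[s]] from rfl,
      pvFold_run rest hrest [] [s] k]
    rw [pvGroupRuns]
    simp [hk]

-- ---- B = runs ----

theorem pvBounds_eq_nat (data : List (List (String × String))) :
    pvBounds data =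
      ((List.range data.length).filter
        (fun (k : ℕ) => ((k : Int) == 0 || !(pvKeyAt data (k : Int) == pvKeyAt data ((k : Int) - 1))))).map
        (fun (k : ℕ) => (k : Int)) := by
  unfold pvBounds
  rw [PySem.List.pyRange_one, List.filter_map]
  have h1 : ((PySem.List.len data) - 0).toNat = data.length := by simp [PySem.List.len_eq]
  rw [h1]
  rw [show ((fun i : Int => i == 0 || !(pvKeyAt data i == pvKeyAt data (i - 1))) ∘
        (fun k : ℕ => (0:Int) + ↑k)) =
      (fun k : ℕ => ((k : Int) == 0 || !(pvKeyAt data (k : Int) == pvKeyAt data ((k : Int) - 1))))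
      from by funext k; simp]
  rw [show (fun k : ℕ => (0:Int) + ↑k) = (fun k : ℕ => (↑k : Int)) from by funext k; ring]

theorem pvKeyAt_drop (data : List (List (String × String))) (L j : ℕ) :
    pvKeyAt (data.drop L) (j : Int) = pvKeyAt data ((L : Int) + (j : Int)) := by
  unfold pvKeyAt
  rw [show ((L:Int)+(j:Int)) = (((L+j : ℕ)) : Int) by push_cast; ring]
  rw [PySem.List.pyGet?_natCast, PySem.List.pyGet?_natCast, List.getElem?_drop]

theorem pvKeyAt_natCast (data : List (List (String × String))) (j : ℕ) :
    pvKeyAt data (j : Int) = data[j]?.bind pvKey := by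
  simp [pvKeyAt, PySem.List.pyGet?_natCast]

theorem pvRun_key (s : List (String × String)) (rest : List (List (String × String))) (j : ℕ)
    (hj : j < (rest.takeWhile (fun t => pvKey t == pvKey s)).length + 1) :
    pvKeyAt (s :: rest) (j : Int) = pvKey s := by
  set r := rest.takeWhile (fun t => pvKey t == pvKey s) with hr
  have hsplit : r ++ rest.dropWhile (fun t => pvKey t == pvKey s) = rest :=
    List.takeWhile_append_dropWhile
  have htake : rest.take r.length = r := by
    conv_lhs => rw [← hsplit]
    exact List.take_left
  rw [pvKeyAt_natCast]
  have hpref : (s :: rest)[j]? = (s :: r)[j]? := by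
    have h1 : (s :: rest).take (r.length + 1) = s :: r := by
      simp [List.take_succ_cons, htake]
    rw [← h1, List.getElem?_take_of_lt hj]
  rw [hpref]
  match j, hj with
  | 0, _ => simp
  | (k+1), hj =>
    have hk : k < r.length := by omega
    have hmem : r[k] ∈ r := List.getElem_mem hk
    have hmem' : r[k] ∈ List.takeWhile (fun t => pvKey t == pvKey s) rest := by
      rw [← hr]; exact hmem
    have hp : (pvKey r[k] == pvKey s) = true := List.mem_takeWhile_imp (p := fun t => pvKey t == pvKey s) hmem'
    have : pvKey r[k] = pvKey s := by simpa using hp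
    simp [List.getElem?_cons_succ, List.getElem?_eq_getElem hk, this]

theorem pvBoundary_key (s x : List (String × String)) (rest xs : List (List (String × String)))
    (hd : rest.dropWhile (fun t => pvKey t == pvKey s) = x :: xs) :
    pvKey x ≠ pvKey s := by
  have hw : (rest.dropWhile (fun t => pvKey t == pvKey s)) ≠ [] := by simp [hd]
  have := List.head_dropWhile_not (fun t => pvKey t == pvKey s) (l := rest) (w := hw)
  simp only [hd, List.head_cons] at this
  simpa using this

theorem pvBounds_cons (s : List (String × String)) (rest : List (List (String × String))) :
    pvBounds (s :: rest) =
      0 :: (pvBounds (rest.dropWhile (fun t => pvKey t == pvKey s))).map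
        (fun b => b + (((rest.takeWhile (fun t => pvKey t == pvKey s)).length : Int) + 1)) := by
  set r := rest.takeWhile (fun t => pvKey t == pvKey s) with hr
  set d := rest.dropWhile (fun t => pvKey t == pvKey s) with hdd
  have hsplit : r ++ d = rest := List.takeWhile_append_dropWhile
  set N := r.length with hN
  set M := d.length with hM
  have hlen : (s :: rest).length = (N + 1) + M := by
    rw [← hsplit]; simp only [List.length_cons, List.length_append]; try omega
  have hdrop : (s :: rest).drop (N + 1) = d := by
    rw [← hsplit]
    show (r ++ d).drop r.length = d
    exact List.drop_left
  have hshift : ∀ k : ℕ, pvKeyAt (s :: rest) ((N + 1 + k : ℕ) : Int) = pvKeyAt d (k : Int) := by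
    intro k
    rw [← hdrop, pvKeyAt_drop]
    try congr 1
    try omega
  have hrun : ∀ j : ℕ, j ≤ N → pvKeyAt (s :: rest) (j : Int) = pvKey s := by
    intro j hj
    exact pvRun_key s rest j (by rw [← hr]; omega)
  rw [pvBounds_eq_nat, pvBounds_eq_nat, hlen, List.range_add, List.filter_append,
    List.filter_map, List.map_append, List.map_map]
  have hA : (List.range (N + 1)).filter
      (fun (k : ℕ) => ((k : Int) == 0 || !(pvKeyAt (s :: rest) (k : Int) == pvKeyAt (s :: rest) ((k : Int) - 1)))) = [0] := by
    rw [List.range_succ_eq_map, List.filter_cons, List.filter_map]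
    have hz : (((0:ℕ) : Int) == 0 || !(pvKeyAt (s :: rest) ((0:ℕ) : Int) == pvKeyAt (s :: rest) (((0:ℕ) : Int) - 1))) = true := by
      simp
    rw [if_pos hz]
    have : (List.range N).filter
        ((fun (k : ℕ) => ((k : Int) == 0 || !(pvKeyAt (s :: rest) (k : Int) == pvKeyAt (s :: rest) ((k : Int) - 1)))) ∘ Nat.succ) = [] := by
      rw [List.filter_eq_nil_iff]
      intro j hj
      have hjN : j < N := List.mem_range.mp hj
      simp only [Function.comp_apply]
      have h1 : pvKeyAt (s :: rest) ((j.succ : ℕ) : Int) = pvKey s := hrun (j+1) (by omega)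
      have h2 : ((j.succ : ℕ) : Int) - 1 = ((j : ℕ) : Int) := by push_cast; ring
      have h3 : pvKeyAt (s :: rest) ((j : ℕ) : Int) = pvKey s := hrun j (by omega)
      rw [h1, h2, h3]
      simp
      omega
    rw [this]
    simp
  rw [hA]
  have hQ : ∀ k ∈ List.range M,
      ((fun (k : ℕ) => ((k : Int) == 0 || !(pvKeyAt (s :: rest) (k : Int) == pvKeyAt (s :: rest) ((k : Int) - 1)))) ∘ (fun x => N + 1 + x)) k =
      (fun (k : ℕ) => ((k : Int) == 0 || !(pvKeyAt d (k : Int) == pvKeyAt d ((k : Int) - 1)))) k := by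
    intro k hk
    have hkM : k < M := List.mem_range.mp hk
    simp only [Function.comp_apply]
    have hz : (((N + 1 + k : ℕ) : Int) == 0) = false := by simp only [beq_eq_false_iff_ne, ne_eq]; omega
    rw [hz, hshift k]
    match k with
    | 0 =>
      have hdne : d ≠ [] := List.length_pos_iff.mp hkM
      obtain ⟨x, xs, hx⟩ := List.exists_cons_of_ne_nil hdne
      have hb : pvKey x ≠ pvKey s := pvBoundary_key s x rest xs (by rw [← hdd, hx])
      have h1 : ((N + 1 + 0 : ℕ) : Int) - 1 = ((N : ℕ) : Int) := by push_cast; ring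
      have h2 : pvKeyAt d ((0:ℕ) : Int) = pvKey x := by
        rw [pvKeyAt_natCast, hx]; simp
      rw [h1, hrun N (by omega), h2]
      simp [hb]
    | (j+1) =>
      have h1 : ((N + 1 + (j+1) : ℕ) : Int) - 1 = ((N + 1 + j : ℕ) : Int) := by push_cast; ring
      have h2 : (((j+1 : ℕ)) : Int) - 1 = ((j : ℕ) : Int) := by push_cast; ring
      have hz2 : (((((j+1) : ℕ)) : Int) == 0) = false := by
        simp only [beq_eq_false_iff_ne, ne_eq]; omega
      rw [h1, hshift j, h2, hz2]
  rw [List.filter_congr hQ]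
  simp only [List.map_cons, List.map_nil, Nat.cast_zero, List.cons_append, List.nil_append]
  congr 1
  rw [List.map_map]
  apply List.map_congr_left
  intro a ha
  simp only [Function.comp_apply]
  push_cast; ring

theorem pvBounds_nil : pvBounds [] = [] := by
  simp [pvBounds, PySem.List.pyRange_one_eq_nil]

theorem pvBounds_nonneg (d : List (List (String × String))) (a : Int) (ha : a ∈ pvBounds d) :
    0 ≤ a ∧ a < PySem.List.len d := by
  unfold pvBounds at ha
  have := List.mem_of_mem_filter ha
  exact PySem.List.mem_pyRange_one.mp this

theorem pvSlice_shift (u v : List (List (String × String))) (a b : Int)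
    (ha : 0 ≤ a) (hb : 0 ≤ b) :
    PySem.List.slice (u ++ v) (some (a + (u.length : Int))) (some (b + (u.length : Int))) =
      PySem.List.slice v (some a) (some b) := by
  rw [PySem.List.slice_toNat _ (by omega) (by omega), PySem.List.slice_toNat _ ha hb]
  have h1 : (a + (u.length : Int)).toNat = u.length + a.toNat := by omega
  have h2 : (b + (u.length : Int)).toNat = b.toNat + u.length := by omega
  rw [h1, h2, List.drop_length_add_append]
  congr 1
  omega

theorem pvB_eq_runs (data : List (List (String × String))) :
    group_data_by_day_alt data = pvGroupRuns data := by
  induction data using pvGroupRuns.induct with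
  | case1 => simp [group_data_by_day_alt, pvBounds_nil, pvGroupRuns]
  | case2 s rest ih =>
    rw [pvGroupRuns]
    set r := rest.takeWhile (fun t => pvKey t == pvKey s) with hr
    set d := rest.dropWhile (fun t => pvKey t == pvKey s) with hdd
    have hsplit : r ++ d = rest := List.takeWhile_append_dropWhile
    have hlen : PySem.List.len (s :: rest) = ((r.length : Int) + 1) + (d.length : Int) := by
      rw [PySem.List.len_eq, ← hsplit]
      simp only [List.length_cons, List.length_append]
      push_cast; ring
    unfold group_data_by_day_alt
    rw [pvBounds_cons s rest, ← hr, ← hdd]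
    cases hD : pvBounds d with
    | nil =>
      have hdnil : d = [] := by
        by_contra hne
        obtain ⟨x, xs, hx⟩ := List.exists_cons_of_ne_nil hne
        have := pvBounds_cons x xs
        rw [← hx, hD] at this
        simp at this
      have hrest : rest = r := by rw [← hsplit, hdnil]; simp
      have hlen0 : PySem.List.len (s :: rest) = ((r.length : Int) + 1) := by
        rw [hlen, hdnil]; simp
      simp only [List.map_nil, List.drop_succ_cons, List.drop_nil, List.nil_append,
        List.zip_cons_cons, List.zip_nil_right, List.map_cons, List.map_nil]
      rw [hdnil, hlen0, PySem.List.slice_zero_start,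
        PySem.List.slice_to (s :: rest) (b := (r.length : Int) + 1) (by positivity)]
      have ht : (((r.length : Int) + 1)).toNat = r.length + 1 := by omega
      rw [ht]
      have htake : (s :: rest).take (r.length + 1) = s :: r := by
        rw [hrest, List.take_succ_cons, List.take_length]
      rw [htake]
      simp [pvGroupRuns]
    | cons b0 t =>
      have hdne : d ≠ [] := by
        intro h0; rw [h0, pvBounds_nil] at hD; cases hD
      obtain ⟨x, xs, hx⟩ := List.exists_cons_of_ne_nil hdne
      have hpc := pvBounds_cons x xs
      rw [← hx, hD] at hpc
      have hb0 : b0 = 0 := by injection hpc with h1 _; 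
      subst hb0
      rw [hlen]
      simp only [List.map_cons, List.drop_succ_cons, List.drop_zero, List.zip_cons_cons,
        List.map_cons, List.cons_append]
      congr 1
      · -- first group: data[0 : L] is the first run
        simp only [zero_add]
        rw [PySem.List.slice_zero_start,
          PySem.List.slice_to (s :: rest) (b := (r.length : Int) + 1) (by positivity)]
        have ht : (((r.length : Int) + 1)).toNat = r.length + 1 := by omega
        rw [ht, ← hsplit, List.take_succ_cons]
        congr 1
        exact List.take_left
      · -- remaining groups: shift by L and recurse on d
        rw [show ((0:Int) + ((r.length : Int) + 1)) :: List.map (fun b => b + ((r.length : Int) + 1)) t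
              = List.map (fun b => b + ((r.length : Int) + 1)) (0 :: t) by simp]
        rw [show List.map (fun b => b + ((r.length : Int) + 1)) t ++ [((r.length : Int) + 1) + (d.length : Int)]
              = List.map (fun b => b + ((r.length : Int) + 1)) (t ++ [(d.length : Int)]) by
            rw [List.map_append]; simp [add_comm]]
        rw [List.zip_map, List.map_map]
        rw [← ih]
        unfold group_data_by_day_alt
        rw [hD, PySem.List.len_eq]
        simp only [List.drop_succ_cons, List.drop_zero]
        apply List.map_congr_left
        rintro ⟨a, b⟩ hp
        obtain ⟨hpa, hpb⟩ := List.of_mem_zip hp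
        have ha : 0 ≤ a := by
          have : a ∈ pvBounds d := by rw [hD]; exact hpa
          exact (pvBounds_nonneg d a this).1
        have hb : 0 ≤ b := by
          rcases List.mem_append.mp hpb with h | h
          · have : b ∈ pvBounds d := by rw [hD]; exact List.mem_cons_of_mem _ h
            exact (pvBounds_nonneg d b this).1
          · simp only [List.mem_singleton] at h
            rw [h]; positivity
        simp only [Function.comp_apply, Prod.map_apply]
        have hcast : ((r.length : Int) + 1) = (((s :: r).length : ℕ) : Int) := by
          simp
        rw [hcast, show s :: rest = (s :: r) ++ d by rw [← hsplit]; rfl]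
        exact pvSlice_shift (s :: r) d a b ha hb


-- ===== VERDICT (by name: the statement is the Claim_ definition above) =====
theorem group_data_by_day_spec : Claim_equal_group_data_by_day := by
  intro data _ hpre
  unfold Spec_group_data_by_day
  rw [pvA_eq_runs data hpre, pvB_eq_runs data]
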